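-- pv_equiv track=rewrite | github.com/VISWESWARAN1998/Neutron | Neutron/validator/sha512_validator.py | is_valid_sha512_hash
-- ===== SOURCE A (Python) =====
-- import string
--
-- def is_valid_sha512_hash(sha512_hash):
--     """
--     This method will check if the entered string is a valid
--     SHA512 hash.
--     :param sha512_hash:
--     :return: True if it is a valid SHA512 hash
--     """
--     if len(sha512_hash) == 128:
--         valid_hash_chars = list(string.ascii_lowercase+string.digits)
--         for character in sha512_hash:
--             if not character in valid_hash_chars:
--                 return False
--         return True
--     return False
-- ===== SOURCE B (Python) =====
-- import re
--
-- _SHA512_RE = re.compile(r'[a-z0-9]{128}\Z')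
--
-- def is_valid_sha512_hash(sha512_hash):
--     """Validate a SHA512 hex digest: exactly 128 lowercase-letter/digit characters."""
--     return _SHA512_RE.fullmatch(sha512_hash) is not None
-- ===== Notes on version B (the rewrite author's own statement) =====
-- stated objective: idiomatic
-- what changed: Replaced the length check plus an explicit per-character loop over a 36-element allowed-character list with a single precompiled regular-expression fullmatch of [a-z0-9]{128}.
import Mathlib
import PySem

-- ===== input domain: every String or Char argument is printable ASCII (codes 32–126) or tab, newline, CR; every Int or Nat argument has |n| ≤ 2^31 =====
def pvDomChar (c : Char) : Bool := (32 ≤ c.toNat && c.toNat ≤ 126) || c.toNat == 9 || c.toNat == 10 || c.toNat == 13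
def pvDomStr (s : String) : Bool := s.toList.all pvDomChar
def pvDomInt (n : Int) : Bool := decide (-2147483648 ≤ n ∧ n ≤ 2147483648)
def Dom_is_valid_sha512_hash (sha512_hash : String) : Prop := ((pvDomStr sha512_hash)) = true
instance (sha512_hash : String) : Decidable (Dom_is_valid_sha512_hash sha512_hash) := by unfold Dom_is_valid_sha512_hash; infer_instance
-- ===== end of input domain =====

-- B replaces A's length check plus per-character scan of a 36-element allowed-character
-- list by a single regex fullmatch of [a-z0-9]{128} (ported as length-128 plus a
-- range check on every character); objective: idiomatic, same behaviour on all strings.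

-- ===== PORT A =====
-- string.ascii_lowercase + string.digits, turned into a list of characters
def pvValidChars : List Char := ("abcdefghijklmnopqrstuvwxyz" ++ "0123456789").toList

-- the 'for character in sha512_hash: if not character in valid_hash_chars: return False' loop
def pvLoopA (valid : List Char) : List Char → Bool
  | [] => true
  | c :: rest => if !(valid.contains c) then false else pvLoopA valid rest

def is_valid_sha512_hash (sha512_hash : String) : Bool :=
  if PySem.Str.len sha512_hash == 128 then
    pvLoopA pvValidChars sha512_hash.toList
  else
    false

-- ===== PORT B =====
-- re.fullmatch(r'[a-z0-9]{128}', s) ported by its contract: exactly 128 characters,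
-- each in 'a'..'z' or '0'..'9'
def is_valid_sha512_hash_alt (sha512_hash : String) : Bool :=
  sha512_hash.toList.length == 128 &&
    sha512_hash.toList.all (fun c => ('a' ≤ c && c ≤ 'z') || ('0' ≤ c && c ≤ '9'))

-- ===== PRECONDITION & SPEC =====
def Spec_is_valid_sha512_hash (sha512_hash : String) (out : Bool) : Prop := out = is_valid_sha512_hash_alt sha512_hash
instance (sha512_hash : String) (out : Bool) : Decidable (Spec_is_valid_sha512_hash sha512_hash out) := by unfold Spec_is_valid_sha512_hash; infer_instance

-- ===== CLAIM (what is proved, stated in full; the proofs are below) =====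
def Claim_equal_is_valid_sha512_hash : Prop := ∀ (sha512_hash : String), Dom_is_valid_sha512_hash sha512_hash → Spec_is_valid_sha512_hash sha512_hash (is_valid_sha512_hash sha512_hash)

-- ===== LEMMAS AND PROOFS =====

-- membership in A's 36-character list coincides with B's two range checks
set_option maxRecDepth 4000 in
theorem pv_contains_valid (c : Char) :
    pvValidChars.contains c = (('a' ≤ c && c ≤ 'z') || ('0' ≤ c && c ≤ '9')) := by
  rcases c with ⟨v, hv⟩
  simp only [pvValidChars, String.toList_append,
    show ("abcdefghijklmnopqrstuvwxyz").toList = ['a','b','c','d','e','f','g','h','i','j','k','l','m','n','o','p','q','r','s','t','u','v','w','x','y','z'] from rfl,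
    show ("0123456789").toList = ['0','1','2','3','4','5','6','7','8','9'] from rfl]
  simp only [List.contains, List.elem_eq_mem, List.mem_append, List.mem_cons,
    List.not_mem_nil, or_false]
  simp only [Char.ext_iff, Char.le_def, UInt32.le_iff_toNat_le, UInt32.ext_iff]
  rw [Bool.eq_iff_iff]
  simp only [decide_eq_true_eq, Bool.or_eq_true, Bool.and_eq_true]
  simp only [show ('0'.val.toNat) = 48 from rfl, show ('1'.val.toNat) = 49 from rfl, show ('2'.val.toNat) = 50 from rfl, show ('3'.val.toNat) = 51 from rfl, show ('4'.val.toNat) = 52 from rfl, show ('5'.val.toNat) = 53 from rfl, show ('6'.val.toNat) = 54 from rfl, show ('7'.val.toNat) = 55 from rfl, show ('8'.val.toNat) = 56 from rfl, show ('9'.val.toNat) = 57 from rfl, show ('a'.val.toNat) = 97 from rfl, show ('b'.val.toNat) = 98 from rfl, show ('c'.val.toNat) = 99 from rfl, show ('d'.val.toNat) = 100 from rfl, show ('e'.val.toNat) = 101 from rfl, show ('f'.val.toNat) = 102 from rfl, show ('g'.val.toNat) = 103 from rfl, show ('h'.val.toNat) = 104 from rfl, show ('i'.val.toNat) = 105 from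 rfl, show ('j'.val.toNat) = 106 from rfl, show ('k'.val.toNat) = 107 from rfl, show ('l'.val.toNat) = 108 from rfl, show ('m'.val.toNat) = 109 from rfl, show ('n'.val.toNat) = 110 from rfl, show ('o'.val.toNat) = 111 from rfl, show ('p'.val.toNat) = 112 from rfl, show ('q'.val.toNat) = 113 from rfl, show ('r'.val.toNat) = 114 from rfl, show ('s'.val.toNat) = 115 from rfl, show ('t'.val.toNat) = 116 from rfl, show ('u'.val.toNat) = 117 from rfl, show ('v'.val.toNat) = 118 from rfl, show ('w'.val.toNat) = 119 from rfl, show ('x'.val.toNat) = 120 from rfl, show ('y'.val.toNat) = 121 from rfl, show ('z'.val.toNat) = 122 from rfl]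
  omega

-- A's early-return loop equals B's all-characters check
theorem pv_loopA_eq_all (l : List Char) :
    pvLoopA pvValidChars l = l.all (fun c => ('a' ≤ c && c ≤ 'z') || ('0' ≤ c && c ≤ '9')) := by
  induction l with
  | nil => rfl
  | cons c rest ih =>
    simp only [pvLoopA, List.all_cons, pv_contains_valid c]
    by_cases h : (('a' ≤ c && c ≤ 'z') || ('0' ≤ c && c ≤ '9')) = true
    · simp [h, ih]
    · simp [Bool.eq_false_iff.mpr h]

-- ===== VERDICT (by name: the statement is the Claim_ definition above) =====
theorem is_valid_sha512_hash_spec : Claim_equal_is_valid_sha512_hash := by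
  intro s _
  unfold Spec_is_valid_sha512_hash is_valid_sha512_hash is_valid_sha512_hash_alt
  rw [pv_loopA_eq_all]
  simp only [PySem.Str.len, String.length_toList]
  by_cases h : s.length = 128
  · simp [h]
  · have h' : ¬((s.length : Int) = 128) := by exact_mod_cast h
    simp [h, h']
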